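-- pv_equiv track=rewrite | github.com/zhenghaur/algorithms_and_ds_fit2004 | assignment3.py | hero
-- ===== SOURCE A (Python) =====
-- def binary_search(attacks, index):
--     """
--     This function searches for the latest possible attack before the attack at input index
--
--     This function will split the list in half each iteration to find the target. Therefore,
--     the search space will decrease by half each iteration and the time complexity would be logN
--     where N is the len(attacks)
--
--     Input:
--         attacks: a list of attacks (as a list of [multiverse, start, end, clones])
--         index: the attack index to search latest possible attacks before
--
--     Return:
--         c: index of the latest possible attack
--         None: if no possible attack
--
--     Time complexity:
--         Best: O(logN) where N = len(attacks)
--         Worst: O(logN) where N = len(attacks)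
--
--     Space complexity:
--         Input: O(N) where N = len(attacks)
--         Aux: O(1)
--
--     """
--     a = 0
--     b = index - 1
--     while a <= b:
--         c = (a + b)//2
--         if attacks[c][2] < attacks[index][1]:
--             if attacks[c + 1][2] < attacks[index][1]:
--                 a = c + 1
--             else:
--                 return c
--         else:
--             b = c - 1
--     return None
--
-- def hero(attacks):
--     """
--     Reference from https://www.geeksforgeeks.org/weighted-job-scheduling-log-n-time/
--
--     This function returns a list of attacks that defeats the maximum amount of clones.
--
--     This function first sorts the attacks list by the end day. Then a memo list is initialized
--     and each iteration of attacks will store the maximum amount of clones killed, which multiverse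
--     to attack, the previous multiverse to attack in a tuple. Using this, the path could be traced by
--     backtracking from the last tuple of memo.
--
--     Input:
--         attacks: a list of attacks (as a list of [multiverse, start, end, clones])
--
--     Return:
--         path: a list of attacks to defeat the maximum amount of clones
--
--     Time complexity:
--         Best: O(NlogN) where N = len(attacks)
--         Worst: O(NlogN) where N = len(attacks)
--
--     Space complexity:
--         Input: O(N) where N = len(attacks)
--         Aux: O(N) where N = len(attacks)
--
--     """
--     # sort attacks by end day
--     attacks = sorted(attacks, key = lambda x: x[2])
--
--     # initialize memo
--     memo = [None] * len(attacks)
--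
--     # initialize first iteration of memo (no choices or decisions)
--     memo[0] = (attacks[0][3], 0, None)
--
--     for i in range(1, len(attacks)):
--         # kills in that attack
--         kills = attacks[i][3]
--
--         # finding for previous possible attacks
--         previous = binary_search(attacks, i)
--         if previous != None:
--             kills += memo[previous][0]
--             previous = memo[previous][1]
--
--         # decision (comparing)
--         if kills > memo[i-1][0]:
--             memo[i] = (kills, i, previous)
--         else:
--             memo[i] = memo[i - 1]
--
--     # backtracking path rebuilding
--     path = []
--     previous = memo[-1][1]
--     while previous != None:
--         path.append(attacks[previous])
--         previous = memo[previous][2]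
--
--     return path
-- ===== SOURCE B (Python) =====
-- def hero(attacks):
--     # Same task as A: sort by end day, weighted-interval DP carrying the
--     # solution paths directly (no memo tuples, no backtracking pass).
--     order = sorted(attacks, key=lambda x: x[2])
--     best = []   # best[i]: max kills achievable among the first i+1 attacks
--     paths = []  # paths[i]: the corresponding attack list, latest attack first
--     for i in range(len(order)):
--         atk = order[i]
--         # predecessor: last attack (in end-day order) ending before atk starts,
--         # usable only when it actually precedes position i
--         p = sum(1 for row in order if row[2] < atk[1]) - 1
--         if 0 <= p < i:
--             take = atk[3] + best[p]
--             tpath = [atk] + paths[p]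
--         else:
--             take = atk[3]
--             tpath = [atk]
--         if i == 0 or take > best[i - 1]:
--             best.append(take)
--             paths.append(tpath)
--         else:
--             best.append(best[i - 1])
--             paths.append(paths[i - 1])
--     return paths[-1]
-- ===== Notes on version B (the rewrite author's own statement) =====
-- stated objective: alternative
-- what changed: Replaces A's hand-written binary search + tuple memo + separate backtracking pass by a DP that finds each predecessor with a direct count of attacks ending before the start day and carries the solution path lists themselves, so no parent links and no backtracking loop remain.
import Mathlib
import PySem

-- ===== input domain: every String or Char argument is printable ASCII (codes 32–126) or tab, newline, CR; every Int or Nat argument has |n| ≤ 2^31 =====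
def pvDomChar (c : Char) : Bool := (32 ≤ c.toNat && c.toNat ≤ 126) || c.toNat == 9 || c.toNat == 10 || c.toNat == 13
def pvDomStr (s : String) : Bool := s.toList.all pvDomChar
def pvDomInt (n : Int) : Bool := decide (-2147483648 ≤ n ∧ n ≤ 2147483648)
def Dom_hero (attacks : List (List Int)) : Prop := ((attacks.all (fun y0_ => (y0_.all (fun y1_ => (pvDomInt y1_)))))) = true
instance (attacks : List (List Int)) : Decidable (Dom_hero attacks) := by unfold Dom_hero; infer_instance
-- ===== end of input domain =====

-- B replaces A's hand-written binary search, tuple memo and separate backtracking pass by a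
-- count-based predecessor rule and a DP that carries the solution path lists directly
-- (objective: alternative); neither A nor B mutates its argument.

-- ===== PORT A =====

-- xs[i][k]; on inputs admitted by Pre_hero every such access is in range, where this equals Python's value
def pvCell (xs : List (List Int)) (i k : Int) : Int :=
  PySem.List.pyGetD (PySem.List.pyGetD xs i []) k 0

def pvBsLoop (attacks : List (List Int)) (index a b : Int) : Option Int :=
  if h : a ≤ b then
    let c := PySem.Int.floordiv (a + b) 2
    if pvCell attacks c 2 < pvCell attacks index 1 then
      if pvCell attacks (c + 1) 2 < pvCell attacks index 1 then
        pvBsLoop attacks index (c + 1) b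
      else some c
    else pvBsLoop attacks index a (c - 1)
  else none
termination_by (b + 1 - a).toNat
decreasing_by
  · have := PySem.Int.floordiv_two_mid_bounds h; omega
  · have := PySem.Int.floordiv_two_mid_bounds h; omega

def pvBinarySearch (attacks : List (List Int)) (index : Int) : Option Int :=
  pvBsLoop attacks index 0 (index - 1)

def pvMGet (memo : List (Int × Int × Option Int)) (i : Int) : Int × Int × Option Int :=
  PySem.List.pyGetD memo i (0, 0, none)

def pvHeroStep (atk : List (List Int)) (memo : List (Int × Int × Option Int)) (i : Int) :
    List (Int × Int × Option Int) :=
  let kills0 := pvCell atk i 3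
  let kp : Int × Option Int :=
    match pvBinarySearch atk i with
    | some p => (kills0 + (pvMGet memo p).1, some ((pvMGet memo p).2.1))
    | none => (kills0, none)
  if (pvMGet memo (i - 1)).1 < kp.1 then memo ++ [(kp.1, i, kp.2)]
  else memo ++ [pvMGet memo (i - 1)]

def pvHeroBT (atk : List (List Int)) (memo : List (Int × Int × Option Int)) :
    Nat → Option Int → List (List Int) → List (List Int)
  | _, none, path => path
  | 0, some _, path => path
  | fuel + 1, some p, path =>
      pvHeroBT atk memo fuel ((pvMGet memo p).2.2) (path ++ [PySem.List.pyGetD atk p []])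

-- A raises IndexError at `memo[0] = …` on the empty list (excluded by Pre_hero); the guard only totalizes
def hero (attacks : List (List Int)) : List (List Int) :=
  let atk := PySem.List.sorted attacks (fun x => PySem.List.pyGetD x 2 0)
  if atk = [] then []
  else
    let memo := (PySem.List.pyRange 1 (atk.length : Int) 1).foldl (pvHeroStep atk)
      [(pvCell atk 0 3, 0, none)]
    pvHeroBT atk memo atk.length (some ((pvMGet memo (-1)).2.1)) []

-- ===== PORT B =====

-- Source B's `sum(1 for row in order if row[2] < s) - 1`
def pvPred (order : List (List Int)) (s : Int) : Int :=
  ((order.countP (fun row => decide (PySem.List.pyGetD row 2 0 < s)) : Nat) : Int) - 1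

def pvAltStep (order : List (List Int)) (st : List Int × List (List (List Int))) (i : Int) :
    List Int × List (List (List Int)) :=
  let atk := PySem.List.pyGetD order i []
  let p := pvPred order (PySem.List.pyGetD atk 1 0)
  let tk : Int × List (List Int) :=
    if 0 ≤ p ∧ p < i then
      (PySem.List.pyGetD atk 3 0 + PySem.List.pyGetD st.1 p 0,
       atk :: PySem.List.pyGetD st.2 p [])
    else (PySem.List.pyGetD atk 3 0, [atk])
  if i = 0 ∨ PySem.List.pyGetD st.1 (i - 1) 0 < tk.1 then
    (st.1 ++ [tk.1], st.2 ++ [tk.2])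
  else
    (st.1 ++ [PySem.List.pyGetD st.1 (i - 1) 0], st.2 ++ [PySem.List.pyGetD st.2 (i - 1) []])

-- Python raises IndexError at `paths[-1]` on the empty list; excluded by Pre_hero
def hero_alt (attacks : List (List Int)) : List (List Int) :=
  let order := PySem.List.sorted attacks (fun x => PySem.List.pyGetD x 2 0)
  let st := (PySem.List.pyRange 0 (order.length : Int) 1).foldl (pvAltStep order) ([], [])
  PySem.List.pyGetD st.2 (-1) []

-- ===== PRECONDITION & SPEC =====

-- Pre_hero = exactly the inputs on which Python A returns: a nonempty list whose rows all
-- have length ≥ 4 (A raises IndexError on the empty list and on any shorter row).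
def Pre_hero (attacks : List (List Int)) : Prop :=
  attacks ≠ [] ∧ ∀ row ∈ attacks, 4 ≤ row.length
instance (attacks : List (List Int)) : Decidable (Pre_hero attacks) := by
  unfold Pre_hero; infer_instance

def pvWitness_hero : List (List Int) := [[1, 0, 1, 5], [2, 2, 3, 7]]

def Spec_hero (attacks : List (List Int)) (out : List (List Int)) : Prop := out = hero_alt attacks
instance (attacks : List (List Int)) (out : List (List Int)) : Decidable (Spec_hero attacks out) := by
  unfold Spec_hero; infer_instance

-- ===== CLAIM (what is proved, stated in full; the proofs are below) =====
def Claim_equal_hero : Prop :=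
  ∀ (attacks : List (List Int)), Dom_hero attacks → Pre_hero attacks →
    Spec_hero attacks (hero attacks)

-- ===== LEMMAS AND PROOFS =====

theorem pvGetD_append_lt {α : Type} (xs ys : List α) (k : Int) (d : α) (h0 : 0 ≤ k)
    (h1 : k < (xs.length : Int)) :
    PySem.List.pyGetD (xs ++ ys) k d = PySem.List.pyGetD xs k d := by
  rw [PySem.List.pyGetD_eq_getElem _ _ h0 (by simp; omega),
      PySem.List.pyGetD_eq_getElem _ _ h0 h1]
  exact List.getElem_append_left (by omega)

theorem pvGetD_append_self {α : Type} (xs : List α) (x : α) (d : α) :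
    PySem.List.pyGetD (xs ++ [x]) (xs.length : Int) d = x := by
  rw [PySem.List.pyGetD_eq_getElem _ _ (by positivity) (by simp)]
  simp

theorem pvGetD_neg_one_eq {α : Type} (xs : List α) (d : α) (h : xs ≠ []) :
    PySem.List.pyGetD xs (-1) d = PySem.List.pyGetD xs ((xs.length - 1 : Nat) : Int) d := by
  have hl : 0 < xs.length := List.length_pos_iff.mpr h
  rw [PySem.List.pyGetD_neg_one _ _ h,
      PySem.List.pyGetD_eq_getElem _ _ (by positivity) (by omega)]
  rw [List.getLast_eq_getElem]
  simp

theorem pvEndsPrefixNat (s : Int) :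
    ∀ (l : List (List Int)),
      l.Pairwise (fun a b => PySem.List.pyGetD a 2 0 ≤ PySem.List.pyGetD b 2 0) →
      ∀ (k : Nat) (hk : k < l.length),
        (PySem.List.pyGetD l[k] 2 0 < s ↔
          k < l.countP (fun row => decide (PySem.List.pyGetD row 2 0 < s))) := by
  intro l
  induction l with
  | nil => intro _ k hk; simp at hk
  | cons x xs ih =>
    intro hpw k hk
    rcases List.pairwise_cons.mp hpw with ⟨hx, hpw'⟩
    rcases k with _ | k
    · simp only [List.getElem_cons_zero, List.countP_cons]
      by_cases hxs : PySem.List.pyGetD x 2 0 < s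
      · simp [hxs]
      · have hz : xs.countP (fun row => decide (PySem.List.pyGetD row 2 0 < s)) = 0 := by
          rw [List.countP_eq_zero]
          intro y hy
          simp only [decide_eq_true_eq]
          intro hys
          exact hxs (lt_of_le_of_lt (hx y hy) hys)
        simp [hxs, hz]
    · simp only [List.getElem_cons_succ, List.countP_cons]
      have hk' : k < xs.length := by simpa using hk
      by_cases hxs : PySem.List.pyGetD x 2 0 < s
      · rw [ih hpw' k hk']
        simp [hxs]
      · have hz : xs.countP (fun row => decide (PySem.List.pyGetD row 2 0 < s)) = 0 := by
          rw [List.countP_eq_zero]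
          intro y hy
          simp only [decide_eq_true_eq]
          intro hys
          exact hxs (lt_of_le_of_lt (hx y hy) hys)
        have hlhs : ¬ PySem.List.pyGetD xs[k] 2 0 < s := by
          intro hys
          exact hxs (lt_of_le_of_lt (hx _ (List.getElem_mem hk')) hys)
        simp [hxs, hz, hlhs]

theorem pvEndsPrefixInt (order : List (List Int))
    (hpw : order.Pairwise (fun a b => PySem.List.pyGetD a 2 0 ≤ PySem.List.pyGetD b 2 0))
    (s : Int) :
    ∀ (k : Int), 0 ≤ k → k < (order.length : Int) →
      (pvCell order k 2 < s ↔ k ≤ pvPred order s) := by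
  intro k h0 h1
  have hk : k.toNat < order.length := by omega
  have hchar := pvEndsPrefixNat s order hpw k.toNat hk
  unfold pvCell pvPred
  rw [PySem.List.pyGetD_eq_getElem _ _ h0 h1]
  rw [hchar]
  omega

theorem pvBsLoop_eq (l : List (List Int)) (i : Int) (j : Int)
    (hin : i < (l.length : Int))
    (hP : ∀ (k : Int), 0 ≤ k → k < (l.length : Int) →
      (pvCell l k 2 < pvCell l i 1 ↔ k ≤ j)) :
    ∀ (a b : Int), 0 ≤ a → b ≤ i - 1 →
      (0 ≤ j → j < i → a ≤ j) → (j < i → j ≤ b) →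
      pvBsLoop l i a b = if 0 ≤ j ∧ j < i then some j else none := by
  intro a b
  generalize hm : (b + 1 - a).toNat = m
  induction m using Nat.strong_induction_on generalizing a b with
  | _ m ih =>
    intro ha hb haj hjb
    rw [pvBsLoop]
    by_cases h : a ≤ b
    · simp only [dif_pos h]
      have hc := PySem.Int.floordiv_two_mid_bounds h
      set c := PySem.Int.floordiv (a + b) 2 with hcdef
      have hc0 : 0 ≤ c := le_trans ha hc.1
      have hcb : c ≤ b := hc.2
      by_cases hPc : pvCell l c 2 < pvCell l i 1
      · have hcj : c ≤ j := (hP c hc0 (by omega)).mp hPc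
        simp only [if_pos hPc]
        by_cases hPc1 : pvCell l (c + 1) 2 < pvCell l i 1
        · have hc1j : c + 1 ≤ j := (hP (c + 1) (by omega) (by omega)).mp hPc1
          simp only [if_pos hPc1]
          exact ih (b + 1 - (c + 1)).toNat (by omega) (c + 1) b rfl (by omega) (by omega)
            (by omega) (by omega)
        · have hjc : j ≤ c := by
            by_contra hlt
            exact hPc1 ((hP (c + 1) (by omega) (by omega)).mpr (by omega))
          simp only [if_neg hPc1]
          have : j = c := le_antisymm hjc hcj
          rw [if_pos ⟨by omega, by omega⟩, this]
      · have hjc : j < c := by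
          by_contra hge
          exact hPc ((hP c hc0 (by omega)).mpr (by omega))
        simp only [if_neg hPc]
        exact ih (c - 1 + 1 - a).toNat (by omega) a (c - 1) rfl ha (by omega)
          (by omega) (by omega)
    · simp only [dif_neg h]
      rw [if_neg]
      omega

theorem pvBinarySearch_eq (order : List (List Int))
    (hpw : order.Pairwise (fun a b => PySem.List.pyGetD a 2 0 ≤ PySem.List.pyGetD b 2 0))
    (i : Int) (hin : i < (order.length : Int)) :
    pvBinarySearch order i =
      if 0 ≤ pvPred order (pvCell order i 1) ∧ pvPred order (pvCell order i 1) < i then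
        some (pvPred order (pvCell order i 1))
      else none := by
  exact pvBsLoop_eq order i (pvPred order (pvCell order i 1)) hin
    (pvEndsPrefixInt order hpw (pvCell order i 1)) 0 (i - 1)
    le_rfl le_rfl (by omega)
    (by intro hlt; omega)

def pvChain (memo : List (Int × Int × Option Int)) : Prop :=
  ∀ (k : Int), 0 ≤ k → k < (memo.length : Int) →
    ∀ q, (pvMGet memo k).2.2 = some q → 0 ≤ q ∧ q < k

theorem pvBT_acc (atk : List (List Int)) (memo : List (Int × Int × Option Int)) :
    ∀ (fuel : Nat) (p : Option Int) (path : List (List Int)),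
      pvHeroBT atk memo fuel p path = path ++ pvHeroBT atk memo fuel p [] := by
  intro fuel
  induction fuel with
  | zero => intro p path; cases p <;> simp [pvHeroBT]
  | succ f ih =>
    intro p path
    cases p with
    | none => simp [pvHeroBT]
    | some q =>
      simp only [pvHeroBT]
      rw [ih ((pvMGet memo q).2.2) (path ++ [PySem.List.pyGetD atk q []]),
          ih ((pvMGet memo q).2.2) ([] ++ [PySem.List.pyGetD atk q []])]
      simp

theorem pvBT_append (atk : List (List Int)) (memo ext : List (Int × Int × Option Int))
    (hch : pvChain memo) :
    ∀ (fuel : Nat) (p : Int) (path : List (List Int)), 0 ≤ p → p < (memo.length : Int) →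
      pvHeroBT atk (memo ++ ext) fuel (some p) path = pvHeroBT atk memo fuel (some p) path := by
  intro fuel
  induction fuel with
  | zero => intro p path _ _; simp [pvHeroBT]
  | succ f ih =>
    intro p path hp0 hpl
    simp only [pvHeroBT]
    have hmg : pvMGet (memo ++ ext) p = pvMGet memo p := by
      unfold pvMGet; exact pvGetD_append_lt _ _ _ _ hp0 hpl
    rw [hmg]
    rcases hq : (pvMGet memo p).2.2 with _ | q
    · simp [pvHeroBT]
    · have := hch p hp0 hpl q hq
      exact ih q _ this.1 (by omega)

def pvInv (order : List (List Int)) (i : Nat) (memo : List (Int × Int × Option Int))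
    (st : List Int × List (List (List Int))) : Prop :=
  memo.length = i ∧ st.1.length = i ∧ st.2.length = i ∧
  ∀ k : Nat, k < i →
    (pvMGet memo (k : Int)).1 = PySem.List.pyGetD st.1 (k : Int) 0 ∧
    0 ≤ (pvMGet memo (k : Int)).2.1 ∧ (pvMGet memo (k : Int)).2.1 ≤ (k : Int) ∧
    pvMGet memo ((pvMGet memo (k : Int)).2.1) = pvMGet memo (k : Int) ∧
    (∀ q, (pvMGet memo (k : Int)).2.2 = some q → 0 ≤ q ∧ q < (pvMGet memo (k : Int)).2.1) ∧
    (∀ fuel : Nat, k < fuel →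
      pvHeroBT order memo fuel (some ((pvMGet memo (k : Int)).2.1)) [] =
        PySem.List.pyGetD st.2 (k : Int) [])

theorem pvInv_chain (order : List (List Int)) (i : Nat)
    (memo : List (Int × Int × Option Int)) (st : List Int × List (List (List Int)))
    (hinv : pvInv order i memo st) : pvChain memo := by
  obtain ⟨hlm, _, _, H⟩ := hinv
  intro k hk0 hkl q hq
  have hk : k.toNat < i := by omega
  have hcast : ((k.toNat : Nat) : Int) = k := by omega
  have := (H k.toNat hk).2.2.2.2.1 q (by rw [hcast]; exact hq)
  rw [hcast] at this
  have hle := (H k.toNat hk).2.2.1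
  rw [hcast] at hle
  omega

theorem pvInv_extend (order : List (List Int)) (i : Nat)
    (memo : List (Int × Int × Option Int)) (st : List Int × List (List (List Int)))
    (hinv : pvInv order i memo st)
    (e : Int × Int × Option Int) (v : Int) (tp : List (List Int))
    (he1 : e.1 = v)
    (hc0 : 0 ≤ e.2.1) (hci : e.2.1 ≤ (i : Int))
    (hcself : e.2.1 = (i : Int) ∨ (e.2.1 < (i : Int) ∧ pvMGet memo e.2.1 = e))
    (hq : ∀ q, e.2.2 = some q → 0 ≤ q ∧ q < e.2.1)
    (hbt : ∀ fuel : Nat, i < fuel → pvHeroBT order (memo ++ [e]) fuel (some e.2.1) [] = tp) :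
    pvInv order (i + 1) (memo ++ [e]) (st.1 ++ [v], st.2 ++ [tp]) := by
  obtain ⟨hlm, hl1, hl2, H⟩ := hinv
  have hch := pvInv_chain order i memo st ⟨hlm, hl1, hl2, H⟩
  have hmI : ∀ c : Int, 0 ≤ c → c < (i : Int) → pvMGet (memo ++ [e]) c = pvMGet memo c := by
    intro c h0 h1; unfold pvMGet; exact pvGetD_append_lt _ _ _ _ h0 (by omega)
  have hmNew : pvMGet (memo ++ [e]) (i : Int) = e := by
    unfold pvMGet
    rw [show ((i : Nat) : Int) = ((memo.length : Nat) : Int) by rw [hlm]]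
    exact pvGetD_append_self _ _ _
  have hv1 : ∀ c : Int, 0 ≤ c → c < (i : Int) →
      PySem.List.pyGetD (st.1 ++ [v]) c 0 = PySem.List.pyGetD st.1 c 0 := by
    intro c h0 h1; exact pvGetD_append_lt _ _ _ _ h0 (by omega)
  have hv1New : PySem.List.pyGetD (st.1 ++ [v]) (i : Int) 0 = v := by
    rw [show ((i : Nat) : Int) = ((st.1.length : Nat) : Int) by rw [hl1]]
    exact pvGetD_append_self _ _ _
  have hv2 : ∀ c : Int, 0 ≤ c → c < (i : Int) →
      PySem.List.pyGetD (st.2 ++ [tp]) c [] = PySem.List.pyGetD st.2 c [] := by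
    intro c h0 h1; exact pvGetD_append_lt _ _ _ _ h0 (by omega)
  have hv2New : PySem.List.pyGetD (st.2 ++ [tp]) (i : Int) [] = tp := by
    rw [show ((i : Nat) : Int) = ((st.2.length : Nat) : Int) by rw [hl2]]
    exact pvGetD_append_self _ _ _
  have hBTkeep : ∀ (c : Int), 0 ≤ c → c < (i : Int) → ∀ fuel : Nat,
      pvHeroBT order (memo ++ [e]) fuel (some c) [] = pvHeroBT order memo fuel (some c) [] := by
    intro c h0 h1 fuel
    exact pvBT_append order memo [e] hch fuel c [] h0 (by omega)
  refine ⟨by simp [hlm], by simp [hl1], by simp [hl2], ?_⟩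
  intro k hk
  by_cases hki : k < i
  · have hk0 : (0 : Int) ≤ (k : Int) := by positivity
    have hkI : (k : Int) < (i : Int) := by exact_mod_cast hki
    obtain ⟨H1, H2, H3, H4, H5, H6⟩ := H k hki
    rw [hmI _ hk0 hkI, hv1 _ hk0 hkI, hv2 _ hk0 hkI]
    refine ⟨H1, H2, H3, ?_, H5, ?_⟩
    · rw [hmI _ H2 (by omega)]; exact H4
    · intro fuel hf
      rw [hBTkeep _ H2 (by omega) fuel]
      exact H6 fuel hf
  · have hki' : k = i := by omega
    subst hki'
    rw [hmNew, hv1New, hv2New]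
    refine ⟨he1, hc0, hci, ?_, hq, ?_⟩
    · rcases hcself with hcase | hcase
      · rw [hcase]; exact hmNew
      · rw [hmI _ hc0 hcase.1, hcase.2]
    · intro fuel hf
      exact hbt fuel hf

theorem pvInv_step (order : List (List Int))
    (hpw : order.Pairwise (fun a b => PySem.List.pyGetD a 2 0 ≤ PySem.List.pyGetD b 2 0))
    (i : Nat) (hi1 : 1 ≤ i) (hin : i < order.length)
    (memo : List (Int × Int × Option Int)) (st : List Int × List (List (List Int)))
    (hinv : pvInv order i memo st) :
    pvInv order (i + 1) (pvHeroStep order memo (i : Int)) (pvAltStep order st (i : Int)) := by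
  have hbs := pvBinarySearch_eq order hpw (i : Int) (by exact_mod_cast hin)
  obtain ⟨hlm, hl1, hl2, H⟩ := hinv
  have hch := pvInv_chain order i memo st ⟨hlm, hl1, hl2, H⟩
  obtain ⟨D1, D2, D3, D4, D5, D6⟩ := H (i - 1) (by omega)
  have hcasti : ((i - 1 : Nat) : Int) = (i : Int) - 1 := by omega
  rw [hcasti] at D1 D2 D3 D4 D5 D6
  unfold pvHeroStep pvAltStep
  simp only [pvCell] at hbs ⊢
  rw [hbs]
  set s := PySem.List.pyGetD (PySem.List.pyGetD order (i : Int) []) 1 0 with hsdef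
  set j := pvPred order s with hjdef
  set atkI := PySem.List.pyGetD order (i : Int) [] with hatk
  set w := PySem.List.pyGetD atkI 3 0 with hw
  by_cases hjc : 0 ≤ j ∧ j < (i : Int)
  · rw [if_pos hjc, if_pos hjc]
    obtain ⟨J1, J2, J3, J4, J5, J6⟩ := H j.toNat (by omega)
    have hcastj : ((j.toNat : Nat) : Int) = j := by omega
    rw [hcastj] at J1 J2 J3 J4 J5 J6
    simp only [D1, J1]
    by_cases hlt : PySem.List.pyGetD st.1 ((i : Int) - 1) 0 < w + PySem.List.pyGetD st.1 j 0
    · rw [if_pos hlt, if_pos (Or.inr hlt)]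
      refine pvInv_extend order i memo st ⟨hlm, hl1, hl2, H⟩
        (w + PySem.List.pyGetD st.1 j 0, (i : Int), some (pvMGet memo j).2.1)
        (w + PySem.List.pyGetD st.1 j 0) (atkI :: PySem.List.pyGetD st.2 j [])
        rfl (by positivity) le_rfl (Or.inl rfl) ?_ ?_
      · intro q hqe
        simp only [Option.some.injEq] at hqe
        subst hqe
        exact ⟨J2, by show (pvMGet memo j).2.1 < (i : Int); omega⟩
      · intro fuel hf
        obtain ⟨f, rfl⟩ : ∃ f, fuel = f + 1 := ⟨fuel - 1, by omega⟩
        have hmNew : pvMGet (memo ++ [(w + PySem.List.pyGetD st.1 j 0, (i : Int),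
            some (pvMGet memo j).2.1)]) (i : Int) = (w + PySem.List.pyGetD st.1 j 0, (i : Int),
            some (pvMGet memo j).2.1) := by
          unfold pvMGet
          rw [show ((i : Nat) : Int) = ((memo.length : Nat) : Int) by rw [hlm]]
          exact pvGetD_append_self _ _ _
        simp only [pvHeroBT, hmNew]
        rw [pvBT_acc]
        rw [pvBT_append order memo _ hch f _ [] J2 (by omega)]
        rw [J6 f (by omega)]
        rw [hatk]
        simp
    · rw [if_neg hlt, if_neg (by push Not; exact ⟨by omega, by omega⟩)]
      refine pvInv_extend order i memo st ⟨hlm, hl1, hl2, H⟩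
        (pvMGet memo ((i : Int) - 1)) (PySem.List.pyGetD st.1 ((i : Int) - 1) 0)
        (PySem.List.pyGetD st.2 ((i : Int) - 1) []) D1 D2 (by omega)
        (Or.inr ⟨by omega, D4⟩) D5 ?_
      intro fuel hf
      rw [pvBT_append order memo _ hch fuel _ [] D2 (by omega)]
      exact D6 fuel (by omega)
  · rw [if_neg hjc, if_neg hjc]
    simp only [D1]
    by_cases hlt : PySem.List.pyGetD st.1 ((i : Int) - 1) 0 < w
    · rw [if_pos hlt, if_pos (Or.inr hlt)]
      refine pvInv_extend order i memo st ⟨hlm, hl1, hl2, H⟩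
        (w, (i : Int), none) w [atkI]
        rfl (by positivity) le_rfl (Or.inl rfl) (by intro q hqe; simp at hqe) ?_
      intro fuel hf
      obtain ⟨f, rfl⟩ : ∃ f, fuel = f + 1 := ⟨fuel - 1, by omega⟩
      have hmNew : pvMGet (memo ++ [(w, (i : Int), none)]) (i : Int) = (w, (i : Int), none) := by
        unfold pvMGet
        rw [show ((i : Nat) : Int) = ((memo.length : Nat) : Int) by rw [hlm]]
        exact pvGetD_append_self _ _ _
      simp only [pvHeroBT, hmNew]
      rw [hatk]
      cases f <;> rfl
    · rw [if_neg hlt, if_neg (by push Not; exact ⟨by omega, by omega⟩)]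
      refine pvInv_extend order i memo st ⟨hlm, hl1, hl2, H⟩
        (pvMGet memo ((i : Int) - 1)) (PySem.List.pyGetD st.1 ((i : Int) - 1) 0)
        (PySem.List.pyGetD st.2 ((i : Int) - 1) []) D1 D2 (by omega)
        (Or.inr ⟨by omega, D4⟩) D5 ?_
      intro fuel hf
      rw [pvBT_append order memo _ hch fuel _ [] D2 (by omega)]
      exact D6 fuel (by omega)

theorem pvInv_one (order : List (List Int)) :
    pvInv order 1 [(pvCell order 0 3, 0, none)] (pvAltStep order ([], []) 0) := by
  unfold pvAltStep
  simp only []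
  set p0 := pvPred order (PySem.List.pyGetD (PySem.List.pyGetD order (0 : Int) []) 1 0) with hp0
  rw [if_neg (show ¬(0 ≤ p0 ∧ p0 < (0 : Int)) by rintro ⟨h1, h2⟩; omega),
      if_pos (Or.inl trivial)]
  refine ⟨rfl, rfl, rfl, ?_⟩
  intro k hk
  have hk0 : k = 0 := by omega
  subst hk0
  have hm : pvMGet [(pvCell order 0 3, 0, none)] ((0 : Nat) : Int) = (pvCell order 0 3, 0, none) := rfl
  rw [hm]
  refine ⟨rfl, le_rfl, le_rfl, rfl, by intro q hq; simp at hq, ?_⟩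
  intro fuel hf
  obtain ⟨f, rfl⟩ : ∃ f, fuel = f + 1 := ⟨fuel - 1, by omega⟩
  simp only [pvHeroBT]
  cases f <;> rfl

theorem pvInv_fold (order : List (List Int))
    (hpw : order.Pairwise (fun a b => PySem.List.pyGetD a 2 0 ≤ PySem.List.pyGetD b 2 0)) :
    ∀ i : Nat, 1 ≤ i → i ≤ order.length →
      pvInv order i
        ((PySem.List.pyRange 1 (i : Int) 1).foldl (pvHeroStep order) [(pvCell order 0 3, 0, none)])
        ((PySem.List.pyRange 0 (i : Int) 1).foldl (pvAltStep order) ([], [])) := by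
  intro i
  induction i with
  | zero => omega
  | succ n ih =>
    intro _ hle
    by_cases hn : n = 0
    · subst hn
      have e1 : PySem.List.pyRange 1 ((0 + 1 : Nat) : Int) 1 = [] := by
        rw [show ((0 + 1 : Nat) : Int) = (1 : Int) by norm_num]
        exact PySem.List.pyRange_one_eq_nil le_rfl
      have e2 : PySem.List.pyRange 0 ((0 + 1 : Nat) : Int) 1 = [(0 : Int)] := by
        rw [show ((0 + 1 : Nat) : Int) = (1 : Int) by norm_num]
        rw [PySem.List.pyRange_one_cons (by norm_num),
            show ((0 : Int) + 1) = (1 : Int) by norm_num,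
            PySem.List.pyRange_one_eq_nil le_rfl]
      rw [e1, e2]
      simpa using pvInv_one order
    · have h1n : 1 ≤ n := by omega
      rw [show ((n + 1 : Nat) : Int) = ((n : Nat) : Int) + 1 by push_cast; ring]
      rw [PySem.List.pyRange_one_succ_right (by exact_mod_cast h1n),
          PySem.List.pyRange_one_succ_right (by positivity)]
      rw [List.foldl_append, List.foldl_append]
      simp only [List.foldl_cons, List.foldl_nil]
      exact pvInv_step order hpw n h1n (by omega) _ _ (ih h1n (by omega))

theorem hero_main : ∀ (attacks : List (List Int)), attacks ≠ [] →
    hero attacks = hero_alt attacks := by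
  intro attacks hne
  unfold hero hero_alt
  simp only []
  set order := PySem.List.sorted attacks (fun x => PySem.List.pyGetD x 2 0) with horder
  have hpw := PySem.List.sorted_pairwise attacks (fun x => PySem.List.pyGetD x 2 0)
  rw [← horder] at hpw
  have hone : order ≠ [] := by
    rw [horder]; intro hnil; exact hne ((PySem.List.sorted_eq_nil_iff _ _ _).mp hnil)
  have hlen : 1 ≤ order.length := List.length_pos_iff.mpr hone
  rw [if_neg hone]
  set memo := (PySem.List.pyRange 1 (order.length : Int) 1).foldl (pvHeroStep order)
    [(pvCell order 0 3, 0, none)] with hmemo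
  set st := (PySem.List.pyRange 0 (order.length : Int) 1).foldl (pvAltStep order) ([], []) with hst
  have hinv := pvInv_fold order hpw order.length hlen le_rfl
  rw [← hmemo, ← hst] at hinv
  obtain ⟨hlm, hl1, hl2, H⟩ := hinv
  obtain ⟨-, -, -, -, -, H6⟩ := H (order.length - 1) (by omega)
  have hmne : memo ≠ [] := by
    intro h; rw [h] at hlm; simp at hlm; omega
  have hsne : st.2 ≠ [] := by
    intro h; rw [h] at hl2; simp at hl2; omega
  have hmm : pvMGet memo (-1) = pvMGet memo ((order.length - 1 : Nat) : Int) := by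
    unfold pvMGet
    rw [pvGetD_neg_one_eq _ _ hmne, hlm]
  rw [hmm]
  rw [H6 order.length (by omega)]
  rw [pvGetD_neg_one_eq _ _ hsne, hl2]

-- ===== VERDICT (by name: the statement is the Claim_ definition above) =====
theorem hero_spec : Claim_equal_hero := by
  intro attacks _ hpre
  unfold Spec_hero
  exact hero_main attacks hpre.1
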